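-- pv_equiv track=rewrite | github.com/projectpsu986-droid/pet-monitoring | app.py | _count_activity_transitions
-- ===== SOURCE A (Python) =====
-- def _count_activity_transitions(slots, target_activity: str):
--     """
--     นับ "จำนวนครั้ง" แบบ transition:
--       - นับเมื่อ activity เปลี่ยนจาก ไม่ใช่ target -> เป็น target
--       - นับเฉพาะ slot ที่ status == 'F' (พบแมว)
--     """
--     cnt = 0
--     prev = None
--     for s in slots:
--         if (s.get("status") or "").upper() != "F":
--             continue
--         cur = (s.get("activity") or "").lower()
--         if cur == target_activity and prev != target_activity:
--             cnt += 1
--         prev = cur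
--     return cnt
-- ===== SOURCE B (Python) =====
-- def _dedup_adjacent(xs):
--     """Collapse each maximal run of equal adjacent elements to one element."""
--     out = []
--     for a in xs:
--         if not out or out[-1] != a:
--             out.append(a)
--     return out
--
--
-- def _count_activity_transitions(slots, target_activity: str):
--     # Phase 1: project the lowercased activities of F-status slots.
--     acts = [(s.get("activity") or "").lower()
--             for s in slots
--             if (s.get("status") or "").upper() == "F"]
--     # Phase 2: collapse runs; each maximal run of target becomes one element,
--     # so the number of non-target -> target transitions is just a count.
--     return _dedup_adjacent(acts).count(target_activity)
-- ===== Notes on version B (the rewrite author's own statement) =====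
-- stated objective: alternative
-- what changed: B replaces A's stateful transition-detecting loop by run-length collapsing: it projects the F-slot activities, recursively collapses adjacent duplicate runs, and returns the plain .count of the target in the collapsed list - each maximal run of target is exactly one transition.
import Mathlib
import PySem

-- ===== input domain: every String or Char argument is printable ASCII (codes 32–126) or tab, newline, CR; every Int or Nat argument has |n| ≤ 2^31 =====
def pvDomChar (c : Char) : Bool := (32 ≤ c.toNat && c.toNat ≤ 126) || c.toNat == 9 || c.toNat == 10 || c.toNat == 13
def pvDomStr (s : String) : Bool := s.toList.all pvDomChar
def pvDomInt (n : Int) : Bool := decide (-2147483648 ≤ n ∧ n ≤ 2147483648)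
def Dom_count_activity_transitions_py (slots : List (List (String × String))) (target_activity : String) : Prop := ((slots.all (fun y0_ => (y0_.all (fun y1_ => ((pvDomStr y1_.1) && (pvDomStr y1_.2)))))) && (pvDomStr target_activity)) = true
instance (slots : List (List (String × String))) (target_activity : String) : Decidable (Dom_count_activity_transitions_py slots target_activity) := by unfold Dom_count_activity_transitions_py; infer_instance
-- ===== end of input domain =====

-- B replaces A's stateful transition loop by run-length collapsing: project F-slot activities, collapse adjacent duplicate runs, then count the target (alternative decomposition, same cost).

-- ===== PORT A =====
def count_activity_transitions_py (slots : List (List (String × String))) (target_activity : String) : Int :=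
  (slots.foldl (fun (st : Int × Option String) s =>
      if PySem.Str.upper ((PySem.Dict.mk s).getD "status" "") ≠ "F" then st
      else
        let cur := PySem.Str.lower ((PySem.Dict.mk s).getD "activity" "")
        let cnt := if cur = target_activity ∧ st.2 ≠ some target_activity then st.1 + 1 else st.1
        (cnt, some cur))
    ((0 : Int), (none : Option String))).1

-- ===== PORT B =====
-- the list comprehension of Source B (filter + project, order preserved)
def pvActsB (slots : List (List (String × String))) : List String :=
  slots.foldr (fun s acc =>
    if PySem.Str.upper ((PySem.Dict.mk s).getD "status" "") = "F" then
      PySem.Str.lower ((PySem.Dict.mk s).getD "activity" "") :: acc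
    else acc) []

-- Source B's _dedup_adjacent: iterative collapse of adjacent duplicate runs
def pvDedupAdjacent (xs : List String) : List String :=
  xs.foldl (fun out a => if out = [] ∨ out.getLast? ≠ some a then out ++ [a] else out) []

def count_activity_transitions_py_alt (slots : List (List (String × String))) (target_activity : String) : Int :=
  let acts := pvActsB slots
  (PySem.List.count (pvDedupAdjacent acts) target_activity : Int)

-- ===== PRECONDITION & SPEC =====
def Spec_count_activity_transitions_py (slots : List (List (String × String))) (target_activity : String) (out : Int) : Prop := out = count_activity_transitions_py_alt slots target_activity
instance (slots : List (List (String × String))) (target_activity : String) (out : Int) : Decidable (Spec_count_activity_transitions_py slots target_activity out) := by unfold Spec_count_activity_transitions_py; infer_instance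

-- ===== CLAIM (what is proved, stated in full; the proofs are below) =====
def Claim_equal_count_activity_transitions_py : Prop := ∀ (slots : List (List (String × String))) (target_activity : String), Dom_count_activity_transitions_py slots target_activity → Spec_count_activity_transitions_py slots target_activity (count_activity_transitions_py slots target_activity)

-- ===== LEMMAS AND PROOFS =====
-- reference transition count: prev-state recursion over the projected activity list
def pvCountT (t : String) : Option String → List String → Int
  | _, [] => 0
  | prev, c :: cs => (if c = t ∧ prev ≠ some t then 1 else 0) + pvCountT t (some c) cs

theorem pvAFold (t : String) (slots : List (List (String × String))) (cnt : Int) (prev : Option String) :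
    (slots.foldl (fun (st : Int × Option String) s =>
      if PySem.Str.upper ((PySem.Dict.mk s).getD "status" "") ≠ "F" then st
      else
        let cur := PySem.Str.lower ((PySem.Dict.mk s).getD "activity" "")
        let cnt := if cur = t ∧ st.2 ≠ some t then st.1 + 1 else st.1
        (cnt, some cur))
      (cnt, prev)).1 = cnt + pvCountT t prev (pvActsB slots) := by
  induction slots generalizing cnt prev with
  | nil => simp [pvActsB, pvCountT]
  | cons s rest ih =>
    simp only [List.foldl_cons]
    by_cases h : PySem.Str.upper ((PySem.Dict.mk s).getD "status" "") = "F"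
    · have hB : pvActsB (s :: rest) =
          PySem.Str.lower ((PySem.Dict.mk s).getD "activity" "") :: pvActsB rest := by
        simp [pvActsB, h]
      rw [hB, if_neg (by simp [h])]
      simp only [ih, pvCountT]
      split_ifs <;> omega
    · have hB : pvActsB (s :: rest) = pvActsB rest := by simp [pvActsB, h]
      rw [hB, if_pos h, ih]

-- invariant of Source B's dedup loop: counting the target in the collapsed list
-- equals the prev-state transition count seeded with the accumulator's last element
theorem pvDedupFold (t : String) (l : List String) (d : List String) :
    (PySem.List.count
      (l.foldl (fun out a => if out = [] ∨ out.getLast? ≠ some a then out ++ [a] else out) d) t : Int)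
    = (PySem.List.count d t : Int) + pvCountT t d.getLast? l := by
  induction l generalizing d with
  | nil => simp [pvCountT]
  | cons a l ih =>
    simp only [List.foldl_cons]
    by_cases h : d = [] ∨ d.getLast? ≠ some a
    · rw [if_pos h, ih]
      have hlast : (d ++ [a]).getLast? = some a := by simp
      rw [hlast]
      have hcnt : (PySem.List.count (d ++ [a]) t : Int)
          = (PySem.List.count d t : Int) + (if a = t then 1 else 0) := by
        simp [PySem.List.count_eq, List.count_append]
        split_ifs with hat <;> simp [hat]
      rw [hcnt]
      have hfix : (if a = t ∧ d.getLast? ≠ some t then (1:Int) else 0)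
          = (if a = t then 1 else 0) := by
        rcases h with h | h
        · simp [h]
        · by_cases hat : a = t
          · simp [hat, hat ▸ h]
          · simp [hat]
      simp only [pvCountT, hfix]
      ring
    · rw [if_neg h, ih]
      push Not at h
      simp only [pvCountT, h.2]
      have : ¬ (a = t ∧ some a ≠ some t) := by rintro ⟨rfl, hne⟩; exact hne rfl
      rw [if_neg this]
      ring

-- ===== VERDICT (by name: the statement is the Claim_ definition above) =====
theorem count_activity_transitions_py_spec : Claim_equal_count_activity_transitions_py := by
  intro slots t _
  unfold Spec_count_activity_transitions_py count_activity_transitions_py count_activity_transitions_py_alt pvDedupAdjacent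
  rw [pvAFold, pvDedupFold]
  simp
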